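-- pv_equiv track=rewrite | github.com/andyhsi2023-cq/sweet-trap-paper1 | 03-analysis/part3-molecular/scripts/08_orthofinder_classify.py | classify_cluster
-- ===== SOURCE A (Python) =====
-- DRD_LABELS = {"DRD1", "DRD2", "DRD3", "DRD4", "DRD5", "DRD2A"}
--
-- HTR_LABELS = {"HTR1A", "HTR2A", "HTR1B"}
--
-- ADR_LABELS = {"ADRA1A", "ADRB1"}
--
-- OA_LABELS = {"OctR_Oamb_Dmel", "OctB2R_Dmel"}
--
-- TAR_LABELS = {"TyrR_Dmel"}
--
-- CHRM_LABELS = {"CHRM1"}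
--
-- HRH_LABELS = {"HRH1"}
--
-- INVERT_5HT_LABELS = {"5HT1A_Dmel", "5HT2A_Dmel", "5HT7_Dmel",
--                      "5HT1Ap_Acal", "5HT2_Acal"}
--
-- def label_of(header: str) -> str:
--     """Extract label (e.g. 'DRD1', 'MollCnid_DopR_1_candidate') from
--     the header which has the form accession__label or similar."""
--     # Everything after the first '__'
--     if "__" in header:
--         return header.split("__", 1)[1]
--     return header
--
-- def classify_cluster(headers: list[str]) -> str:
--     """Assign a functional identity to a cluster based on its members."""
--     labels = [label_of(h) for h in headers]
--     has_drd = any(l in DRD_LABELS for l in labels)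
--     has_htr = any(l in HTR_LABELS for l in labels)
--     has_adr = any(l in ADR_LABELS for l in labels)
--     has_oa = any(l in OA_LABELS for l in labels)
--     has_tar = any(l in TAR_LABELS for l in labels)
--     has_5ht_invert = any(l in INVERT_5HT_LABELS for l in labels)
--     has_chrm = any(l in CHRM_LABELS for l in labels)
--     has_hrh = any(l in HRH_LABELS for l in labels)
--
--     anchors = [
--         ("TRUE_DRD", has_drd),
--         ("HTR_serotonin", has_htr or has_5ht_invert),
--         ("ADR_adrenergic", has_adr),
--         ("OA_octopamine", has_oa),
--         ("TAR_tyramine", has_tar),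
--         ("CHRM_muscarinic", has_chrm),
--         ("HRH_histamine", has_hrh),
--     ]
--     present = [name for name, ok in anchors if ok]
--     if len(present) == 1:
--         return present[0]
--     if len(present) > 1:
--         # Ambiguous cluster — under-clustered. Still mark as mixed so
--         # downstream knows.
--         return "AMBIGUOUS_mixed:" + "+".join(present)
--     return "UNRESOLVED_no_anchor"
-- ===== SOURCE B (Python) =====
-- # B: single lookup table label -> anchor category, one pass building present_set,
-- # then one filter over the fixed anchor order; same len==1 / >1 / 0 logic.
--
-- ANCHOR_ORDER = ["TRUE_DRD", "HTR_serotonin", "ADR_adrenergic", "OA_octopamine",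
--                 "TAR_tyramine", "CHRM_muscarinic", "HRH_histamine"]
--
-- CATEGORY_OF = {
--     "DRD1": "TRUE_DRD", "DRD2": "TRUE_DRD", "DRD3": "TRUE_DRD",
--     "DRD4": "TRUE_DRD", "DRD5": "TRUE_DRD", "DRD2A": "TRUE_DRD",
--     "HTR1A": "HTR_serotonin", "HTR2A": "HTR_serotonin", "HTR1B": "HTR_serotonin",
--     "5HT1A_Dmel": "HTR_serotonin", "5HT2A_Dmel": "HTR_serotonin",
--     "5HT7_Dmel": "HTR_serotonin", "5HT1Ap_Acal": "HTR_serotonin",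
--     "5HT2_Acal": "HTR_serotonin",
--     "ADRA1A": "ADR_adrenergic", "ADRB1": "ADR_adrenergic",
--     "OctR_Oamb_Dmel": "OA_octopamine", "OctB2R_Dmel": "OA_octopamine",
--     "TyrR_Dmel": "TAR_tyramine",
--     "CHRM1": "CHRM_muscarinic",
--     "HRH1": "HRH_histamine",
-- }
--
-- def label_of(header: str) -> str:
--     if "__" in header:
--         return header.split("__", 1)[1]
--     return header
--
-- def classify_cluster(headers: list[str]) -> str:
--     present_set = set()
--     for h in headers:
--         cat = CATEGORY_OF.get(label_of(h))
--         if cat is not None: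
--             present_set.add(cat)
--     present = [c for c in ANCHOR_ORDER if c in present_set]
--     if len(present) == 1:
--         return present[0]
--     if len(present) > 1:
--         return "AMBIGUOUS_mixed:" + "+".join(present)
--     return "UNRESOLVED_no_anchor"
-- ===== Notes on version B (the rewrite author's own statement) =====
-- stated objective: faster
-- what changed: Replaces the eight separate any-scans over the label list and the anchors pair-list with one label-to-category lookup dict applied in a single pass that builds a present-set, then one filter of the fixed anchor order.
import Mathlib
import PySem

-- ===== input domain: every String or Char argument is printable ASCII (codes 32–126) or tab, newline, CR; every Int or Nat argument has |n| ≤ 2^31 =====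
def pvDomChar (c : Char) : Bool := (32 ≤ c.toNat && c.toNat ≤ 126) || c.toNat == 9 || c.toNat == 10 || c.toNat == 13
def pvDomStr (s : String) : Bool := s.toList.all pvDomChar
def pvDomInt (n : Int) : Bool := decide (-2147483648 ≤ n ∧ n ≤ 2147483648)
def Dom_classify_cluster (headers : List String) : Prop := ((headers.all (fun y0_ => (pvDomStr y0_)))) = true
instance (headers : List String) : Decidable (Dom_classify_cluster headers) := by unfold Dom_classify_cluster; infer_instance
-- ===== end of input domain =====

-- B replaces A's eight separate any-scans over the labels with one label→category lookup dict,
-- a single pass building a present-set, and one filter of the fixed anchor order (simpler decomposition).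

-- ===== PORT A =====
def DRD_LABELS : PySem.Set String := PySem.Set.ofList ["DRD1", "DRD2", "DRD3", "DRD4", "DRD5", "DRD2A"]
def HTR_LABELS : PySem.Set String := PySem.Set.ofList ["HTR1A", "HTR2A", "HTR1B"]
def ADR_LABELS : PySem.Set String := PySem.Set.ofList ["ADRA1A", "ADRB1"]
def OA_LABELS : PySem.Set String := PySem.Set.ofList ["OctR_Oamb_Dmel", "OctB2R_Dmel"]
def TAR_LABELS : PySem.Set String := PySem.Set.ofList ["TyrR_Dmel"]
def CHRM_LABELS : PySem.Set String := PySem.Set.ofList ["CHRM1"]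
def HRH_LABELS : PySem.Set String := PySem.Set.ofList ["HRH1"]
def INVERT_5HT_LABELS : PySem.Set String := PySem.Set.ofList ["5HT1A_Dmel", "5HT2A_Dmel", "5HT7_Dmel", "5HT1Ap_Acal", "5HT2_Acal"]

-- shared helper: both Pythons carry the identical label_of (everything after the first '__')
def label_of (header : String) : String :=
  if PySem.Str.isIn "__" header then
    -- header.split("__", 1)[1]; the split never raises (sep ≠ "") and piece 1 exists since "__" in header
    PySem.List.pyGetD ((PySem.Str.splitMax? header "__" 1).getD []) 1 ""
  else header

def classify_cluster (headers : List String) : String :=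
  let labels := headers.map label_of
  let has_drd := labels.any (fun l => PySem.Set.contains DRD_LABELS l)
  let has_htr := labels.any (fun l => PySem.Set.contains HTR_LABELS l)
  let has_adr := labels.any (fun l => PySem.Set.contains ADR_LABELS l)
  let has_oa := labels.any (fun l => PySem.Set.contains OA_LABELS l)
  let has_tar := labels.any (fun l => PySem.Set.contains TAR_LABELS l)
  let has_5ht_invert := labels.any (fun l => PySem.Set.contains INVERT_5HT_LABELS l)
  let has_chrm := labels.any (fun l => PySem.Set.contains CHRM_LABELS l)
  let has_hrh := labels.any (fun l => PySem.Set.contains HRH_LABELS l)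
  let anchors : List (String × Bool) :=
    [("TRUE_DRD", has_drd),
     ("HTR_serotonin", has_htr || has_5ht_invert),
     ("ADR_adrenergic", has_adr),
     ("OA_octopamine", has_oa),
     ("TAR_tyramine", has_tar),
     ("CHRM_muscarinic", has_chrm),
     ("HRH_histamine", has_hrh)]
  let present := (anchors.filter (fun p => p.2)).map (fun p => p.1)
  if present.length == 1 then PySem.List.pyGetD present 0 ""
  else if present.length > 1 then "AMBIGUOUS_mixed:" ++ PySem.Str.join "+" present
  else "UNRESOLVED_no_anchor"

-- ===== PORT B =====
def ANCHOR_ORDER : List String :=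
  ["TRUE_DRD", "HTR_serotonin", "ADR_adrenergic", "OA_octopamine",
   "TAR_tyramine", "CHRM_muscarinic", "HRH_histamine"]

def CATEGORY_OF : PySem.Dict String String := PySem.Dict.ofList
  [("DRD1", "TRUE_DRD"), ("DRD2", "TRUE_DRD"), ("DRD3", "TRUE_DRD"),
   ("DRD4", "TRUE_DRD"), ("DRD5", "TRUE_DRD"), ("DRD2A", "TRUE_DRD"),
   ("HTR1A", "HTR_serotonin"), ("HTR2A", "HTR_serotonin"), ("HTR1B", "HTR_serotonin"),
   ("5HT1A_Dmel", "HTR_serotonin"), ("5HT2A_Dmel", "HTR_serotonin"),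
   ("5HT7_Dmel", "HTR_serotonin"), ("5HT1Ap_Acal", "HTR_serotonin"),
   ("5HT2_Acal", "HTR_serotonin"),
   ("ADRA1A", "ADR_adrenergic"), ("ADRB1", "ADR_adrenergic"),
   ("OctR_Oamb_Dmel", "OA_octopamine"), ("OctB2R_Dmel", "OA_octopamine"),
   ("TyrR_Dmel", "TAR_tyramine"),
   ("CHRM1", "CHRM_muscarinic"),
   ("HRH1", "HRH_histamine")]

def classify_cluster_alt (headers : List String) : String :=
  let presentSet : PySem.Set String := headers.foldl (fun s h =>
      match PySem.Dict.get? CATEGORY_OF (label_of h) with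
      | some cat => PySem.Set.add s cat
      | none => s) PySem.Set.empty
  let present := ANCHOR_ORDER.filter (fun c => PySem.Set.contains presentSet c)
  if present.length == 1 then PySem.List.pyGetD present 0 ""
  else if present.length > 1 then "AMBIGUOUS_mixed:" ++ PySem.Str.join "+" present
  else "UNRESOLVED_no_anchor"

-- ===== PRECONDITION & SPEC =====
def Spec_classify_cluster (headers : List String) (out : String) : Prop := out = classify_cluster_alt headers
instance (headers : List String) (out : String) : Decidable (Spec_classify_cluster headers out) := by unfold Spec_classify_cluster; infer_instance

-- ===== CLAIM (what is proved, stated in full; the proofs are below) =====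
def Claim_equal_classify_cluster : Prop := ∀ (headers : List String), Dom_classify_cluster headers → Spec_classify_cluster headers (classify_cluster headers)

-- ===== LEMMAS AND PROOFS =====

-- membership in the present-set built by B's single pass
lemma mem_presentSet (hs : List String) (s : PySem.Set String) (c : String) :
    c ∈ hs.foldl (fun s h =>
      match PySem.Dict.get? CATEGORY_OF (label_of h) with
      | some cat => PySem.Set.add s cat
      | none => s) s ↔ c ∈ s ∨ ∃ h ∈ hs, PySem.Dict.get? CATEGORY_OF (label_of h) = some c := by
  induction hs generalizing s with
  | nil => simp
  | cons x t ih =>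
    simp only [List.foldl_cons, ih]
    cases hx : PySem.Dict.get? CATEGORY_OF (label_of x) with
    | none => simp [hx]
    | some v =>
      simp [hx, PySem.Set.mem_add]
      tauto

-- B's lookup dict decomposed into A's eight set tests
lemma catOf_spec (l : String) :
    PySem.Dict.get? CATEGORY_OF l =
      (if PySem.Set.contains DRD_LABELS l then some "TRUE_DRD"
       else if PySem.Set.contains HTR_LABELS l || PySem.Set.contains INVERT_5HT_LABELS l then some "HTR_serotonin"
       else if PySem.Set.contains ADR_LABELS l then some "ADR_adrenergic"
       else if PySem.Set.contains OA_LABELS l then some "OA_octopamine"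
       else if PySem.Set.contains TAR_LABELS l then some "TAR_tyramine"
       else if PySem.Set.contains CHRM_LABELS l then some "CHRM_muscarinic"
       else if PySem.Set.contains HRH_LABELS l then some "HRH_histamine"
       else none) := by
  by_cases h : l ∈ (["DRD1", "DRD2", "DRD3", "DRD4", "DRD5", "DRD2A", "HTR1A", "HTR2A", "HTR1B",
      "5HT1A_Dmel", "5HT2A_Dmel", "5HT7_Dmel", "5HT1Ap_Acal", "5HT2_Acal", "ADRA1A", "ADRB1",
      "OctR_Oamb_Dmel", "OctB2R_Dmel", "TyrR_Dmel", "CHRM1", "HRH1"] : List String)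
  · fin_cases h <;> decide
  · have hget : PySem.Dict.get? CATEGORY_OF l = none := by
      rw [PySem.Dict.get?_eq_none_iff_not_mem_keys]
      have hkeys : CATEGORY_OF.keys = ["DRD1", "DRD2", "DRD3", "DRD4", "DRD5", "DRD2A", "HTR1A", "HTR2A", "HTR1B",
          "5HT1A_Dmel", "5HT2A_Dmel", "5HT7_Dmel", "5HT1Ap_Acal", "5HT2_Acal", "ADRA1A", "ADRB1",
          "OctR_Oamb_Dmel", "OctB2R_Dmel", "TyrR_Dmel", "CHRM1", "HRH1"] := by decide
      rw [hkeys]; exact h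
    simp only [List.mem_cons, not_or] at h
    obtain ⟨h1,h2,h3,h4,h5,h6,h7,h8,h9,h10,h11,h12,h13,h14,h15,h16,h17,h18,h19,h20,h21⟩ := h
    rw [hget]
    simp [DRD_LABELS, HTR_LABELS, ADR_LABELS, OA_LABELS, TAR_LABELS, CHRM_LABELS, HRH_LABELS,
      INVERT_5HT_LABELS, PySem.Set.ofList, *]

-- A's any-scan with test p over the labels equals membership of c in B's present-set,
-- given that the dict lookup returns c exactly on p
lemma flag_eq (headers : List String) (c : String) (p : String → Bool)
    (hp : ∀ l, PySem.Dict.get? CATEGORY_OF l = some c ↔ p l = true) :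
    (headers.map label_of).any p
      = PySem.Set.contains (headers.foldl (fun s h =>
          match PySem.Dict.get? CATEGORY_OF (label_of h) with
          | some cat => PySem.Set.add s cat
          | none => s) PySem.Set.empty) c := by
  rw [Bool.eq_iff_iff, PySem.Set.contains_iff, mem_presentSet]
  simp only [List.any_eq_true, List.mem_map, PySem.Set.empty, List.not_mem_nil, false_or]
  constructor
  · rintro ⟨l, ⟨h, hh, rfl⟩, hc⟩
    exact ⟨h, hh, (hp _).2 hc⟩
  · rintro ⟨h, hh, hc⟩
    exact ⟨label_of h, ⟨h, hh, rfl⟩, (hp _).1 hc⟩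

lemma hp_drd (l : String) : PySem.Dict.get? CATEGORY_OF l = some "TRUE_DRD" ↔ PySem.Set.contains DRD_LABELS l = true := by
  constructor
  · intro hc; rw [catOf_spec] at hc
    simp only [PySem.Set.contains_iff, Bool.or_eq_true] at *
    split_ifs at hc <;> simp_all
  · intro hc
    have hm : l ∈ (["DRD1", "DRD2", "DRD3", "DRD4", "DRD5", "DRD2A"] : List String) := by
      simpa [DRD_LABELS, PySem.Set.contains_iff, PySem.Set.mem_ofList] using hc
    fin_cases hm <;> decide

lemma hp_htr (l : String) : PySem.Dict.get? CATEGORY_OF l = some "HTR_serotonin" ↔ (PySem.Set.contains HTR_LABELS l || PySem.Set.contains INVERT_5HT_LABELS l) = true := by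
  constructor
  · intro hc; rw [catOf_spec] at hc
    simp only [PySem.Set.contains_iff, Bool.or_eq_true] at *
    split_ifs at hc <;> simp_all
  · intro hc
    have hm : l ∈ (["HTR1A", "HTR2A", "HTR1B", "5HT1A_Dmel", "5HT2A_Dmel", "5HT7_Dmel", "5HT1Ap_Acal", "5HT2_Acal"] : List String) := by
      simpa [HTR_LABELS, INVERT_5HT_LABELS, PySem.Set.contains_iff, PySem.Set.mem_ofList, or_assoc] using hc
    fin_cases hm <;> decide

lemma hp_adr (l : String) : PySem.Dict.get? CATEGORY_OF l = some "ADR_adrenergic" ↔ PySem.Set.contains ADR_LABELS l = true := by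
  constructor
  · intro hc; rw [catOf_spec] at hc
    simp only [PySem.Set.contains_iff, Bool.or_eq_true] at *
    split_ifs at hc <;> simp_all
  · intro hc
    have hm : l ∈ (["ADRA1A", "ADRB1"] : List String) := by
      simpa [ADR_LABELS, PySem.Set.contains_iff, PySem.Set.mem_ofList] using hc
    fin_cases hm <;> decide

lemma hp_oa (l : String) : PySem.Dict.get? CATEGORY_OF l = some "OA_octopamine" ↔ PySem.Set.contains OA_LABELS l = true := by
  constructor
  · intro hc; rw [catOf_spec] at hc
    simp only [PySem.Set.contains_iff, Bool.or_eq_true] at *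
    split_ifs at hc <;> simp_all
  · intro hc
    have hm : l ∈ (["OctR_Oamb_Dmel", "OctB2R_Dmel"] : List String) := by
      simpa [OA_LABELS, PySem.Set.contains_iff, PySem.Set.mem_ofList] using hc
    fin_cases hm <;> decide

lemma hp_tar (l : String) : PySem.Dict.get? CATEGORY_OF l = some "TAR_tyramine" ↔ PySem.Set.contains TAR_LABELS l = true := by
  constructor
  · intro hc; rw [catOf_spec] at hc
    simp only [PySem.Set.contains_iff, Bool.or_eq_true] at *
    split_ifs at hc <;> simp_all
  · intro hc
    have hm : l ∈ (["TyrR_Dmel"] : List String) := by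
      simpa [TAR_LABELS, PySem.Set.contains_iff, PySem.Set.mem_ofList] using hc
    fin_cases hm <;> decide

lemma hp_chrm (l : String) : PySem.Dict.get? CATEGORY_OF l = some "CHRM_muscarinic" ↔ PySem.Set.contains CHRM_LABELS l = true := by
  constructor
  · intro hc; rw [catOf_spec] at hc
    simp only [PySem.Set.contains_iff, Bool.or_eq_true] at *
    split_ifs at hc <;> simp_all
  · intro hc
    have hm : l ∈ (["CHRM1"] : List String) := by
      simpa [CHRM_LABELS, PySem.Set.contains_iff, PySem.Set.mem_ofList] using hc
    fin_cases hm <;> decide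

lemma hp_hrh (l : String) : PySem.Dict.get? CATEGORY_OF l = some "HRH_histamine" ↔ PySem.Set.contains HRH_LABELS l = true := by
  constructor
  · intro hc; rw [catOf_spec] at hc
    simp only [PySem.Set.contains_iff, Bool.or_eq_true] at *
    split_ifs at hc <;> simp_all
  · intro hc
    have hm : l ∈ (["HRH1"] : List String) := by
      simpa [HRH_LABELS, PySem.Set.contains_iff, PySem.Set.mem_ofList] using hc
    fin_cases hm <;> decide

lemma any_or {α : Type} (xs : List α) (p q : α → Bool) :
    (xs.any p || xs.any q) = xs.any (fun l => p l || q l) := by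
  induction xs with
  | nil => rfl
  | cons a t ih => simp only [List.any_cons, ← ih]; cases p a <;> cases q a <;> simp

-- ===== VERDICT (by name: the statement is the Claim_ definition above) =====
theorem classify_cluster_spec : Claim_equal_classify_cluster := by
  intro headers _
  unfold Spec_classify_cluster classify_cluster classify_cluster_alt
  dsimp only
  simp only [any_or]
  simp only [flag_eq headers _ _ hp_drd, flag_eq headers _ _ hp_htr, flag_eq headers _ _ hp_adr,
      flag_eq headers _ _ hp_oa, flag_eq headers _ _ hp_tar, flag_eq headers _ _ hp_chrm,
      flag_eq headers _ _ hp_hrh]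
  generalize (headers.foldl (fun s h =>
      match PySem.Dict.get? CATEGORY_OF (label_of h) with
      | some cat => PySem.Set.add s cat
      | none => s) PySem.Set.empty) = S
  simp only [ANCHOR_ORDER, List.filter_cons, List.filter_nil]
  generalize PySem.Set.contains S "TRUE_DRD" = b1
  generalize PySem.Set.contains S "HTR_serotonin" = b2
  generalize PySem.Set.contains S "ADR_adrenergic" = b3
  generalize PySem.Set.contains S "OA_octopamine" = b4
  generalize PySem.Set.contains S "TAR_tyramine" = b5
  generalize PySem.Set.contains S "CHRM_muscarinic" = b6
  generalize PySem.Set.contains S "HRH_histamine" = b7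
  revert b1 b2 b3 b4 b5 b6 b7
  decide
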